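-- pv_equiv track=rewrite | github.com/Alexander-Brown13/Nucleosomes_Generate_Mutation_Signature | Post_Analyses/Make_Transcript_Nucleosome_Tally_Graphs.py | round_up_to_largest_base_10
-- ===== SOURCE A (Python) =====
-- def round_up_to_largest_base_10(number):
--     str_number = str(number)
--     len_number = len(str_number) + 1
--     first_digit = int(str_number[0])
--     i = 1
--     str_largest_base_10 = "1"
--     while i < len_number:
--         str_largest_base_10 = str_largest_base_10 + "0"
--         i += 1
--     largest_base_10 = int(str_largest_base_10)
--     return largest_base_10
-- ===== SOURCE B (Python) =====
-- def round_up_to_largest_base_10(number):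
--     return 10 ** len(str(number))
-- ===== Notes on version B (the rewrite author's own statement) =====
-- stated objective: simpler
-- what changed: Replaces the string-concatenation loop (build '1'+'0'*len then int() it) with the closed form 10 ** len(str(number)) and drops the unused first_digit parse.
import Mathlib
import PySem

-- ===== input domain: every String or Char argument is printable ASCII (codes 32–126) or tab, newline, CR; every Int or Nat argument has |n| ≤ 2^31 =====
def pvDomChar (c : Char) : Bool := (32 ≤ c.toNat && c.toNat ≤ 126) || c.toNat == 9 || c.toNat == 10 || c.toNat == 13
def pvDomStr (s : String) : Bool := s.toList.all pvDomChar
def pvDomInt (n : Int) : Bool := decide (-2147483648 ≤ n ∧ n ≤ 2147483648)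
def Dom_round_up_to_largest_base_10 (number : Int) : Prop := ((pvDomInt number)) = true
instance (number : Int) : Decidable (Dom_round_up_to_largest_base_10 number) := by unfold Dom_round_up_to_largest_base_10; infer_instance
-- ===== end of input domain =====

-- B replaces A's string-building loop + int() reparse with the closed form 10 ** len(str(number)) (simpler).


-- ===== PORT A =====
-- the while loop: i runs from 1 to len_number-1, each step appending '0' to the accumulator
def pvLoopA : Nat → List Char → List Char
  | 0, acc => acc
  | k + 1, acc => pvLoopA k (acc ++ ['0'])

def round_up_to_largest_base_10 (number : Int) : Int :=
  let str_number := PySem.Int.toChars number          -- str(number)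
  let len_number := str_number.length + 1             -- len(str_number) + 1
  -- first_digit = int(str_number[0]) : unused; raises ValueError when str_number[0] = '-',
  -- i.e. on negative input — excluded by Pre_ below
  let str_largest_base_10 := pvLoopA (len_number - 1) ['1']
  (PySem.Int.ofChars? str_largest_base_10).getD 0     -- int(...): always a digit string here

-- ===== PORT B =====
def round_up_to_largest_base_10_alt (number : Int) : Int :=
  (10 : Int) ^ (PySem.Int.toChars number).length      -- 10 ** len(str(number))

-- ===== PRECONDITION & SPEC =====
-- Pre_ excludes negative inputs, on which A raises ValueError (int('-') from the unused first_digit line).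
def Pre_round_up_to_largest_base_10 (number : Int) : Prop := 0 ≤ number
instance (number : Int) : Decidable (Pre_round_up_to_largest_base_10 number) := by unfold Pre_round_up_to_largest_base_10; infer_instance
def pvWitness_round_up_to_largest_base_10 : Int := 42

def Spec_round_up_to_largest_base_10 (number : Int) (out : Int) : Prop := out = round_up_to_largest_base_10_alt number
instance (number : Int) (out : Int) : Decidable (Spec_round_up_to_largest_base_10 number out) := by unfold Spec_round_up_to_largest_base_10; infer_instance

-- ===== CLAIM (what is proved, stated in full; the proofs are below) =====
def Claim_equal_round_up_to_largest_base_10 : Prop := ∀ (number : Int), Dom_round_up_to_largest_base_10 number → Pre_round_up_to_largest_base_10 number → Spec_round_up_to_largest_base_10 number (round_up_to_largest_base_10 number)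

-- ===== LEMMAS AND PROOFS =====
theorem pvLoopA_eq (k : Nat) (acc : List Char) : pvLoopA k acc = acc ++ List.replicate k '0' := by
  induction k generalizing acc with
  | zero => simp [pvLoopA]
  | succ k ih => simp [pvLoopA, ih, List.replicate_succ, List.append_assoc]

theorem pvOfChars_one_zeros (L : Nat) (hL : L ≤ 10) :
    PySem.Int.ofChars? ('1' :: List.replicate L '0') = some ((10 : Int) ^ L) := by
  interval_cases L <;> decide

-- ===== VERDICT (by name: the statement is the Claim_ definition above) =====
theorem round_up_to_largest_base_10_spec : Claim_equal_round_up_to_largest_base_10 := by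
  intro n hdom hpre
  unfold Spec_round_up_to_largest_base_10 round_up_to_largest_base_10 round_up_to_largest_base_10_alt
  have hn : ¬ n < 0 := not_lt.mpr hpre
  have hbound : n.toNat < 10 ^ 10 := by
    unfold Dom_round_up_to_largest_base_10 pvDomInt at hdom
    simp at hdom
    omega
  have hlen : (PySem.Int.toChars n).length ≤ 10 := by
    simp [PySem.Int.toChars, hn]
    exact (Nat.length_toDigits_le_iff (by norm_num) (by norm_num)).mpr hbound
  simp only [Nat.add_sub_cancel, pvLoopA_eq, List.singleton_append,
    pvOfChars_one_zeros _ hlen, Option.getD_some]
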